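-- pv_equiv track=rewrite | github.com/pdtlong/Transition-Based-Dependency-Parsing | Transition-Based-Dependency-Parsing_demo/main.py | common_arcs
-- ===== SOURCE A (Python) =====
-- def common_arcs(relations,unique_tags,lr_list):
--     arc_dict = {}
--     arc = {}
--     for tag in unique_tags:
--         tag_left_right = []
--         for _, tags_relation in enumerate(relations):
--             if tag in tags_relation:
--                 tag_left_right.append(list(tags_relation[tag][1::2]))
--             else:
--                 tag_left_right.append(['none'])
--         arc_dict[tag] = tag_left_right
--
--     for tag in unique_tags:
--         count = 0
--         temp_dict = {}
--         for sentence in lr_list: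
--             if tag in sentence:
--                 relation = sentence[tag]
--                 for tags in arc_dict:
--                     head = arc_dict[tags]
--                     value = head[count]
--                     for rel in range(len(relation)):
--                         if relation[rel] in value or relation[rel] == value:
--                             if tags in temp_dict:
--                                 temp_dict[tags] = temp_dict[tags] + 1
--                             else:
--                                 temp_dict[tags] = 1
--             count += 1
--         arc[tag] = temp_dict
--     return arc
-- ===== SOURCE B (Python) =====
-- def common_arcs(relations, unique_tags, lr_list):
--     tagset = list(dict.fromkeys(unique_tags))
--     arc = {tag: {} for tag in tagset}
--     for count, sentence in enumerate(lr_list):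
--         active = [tag for tag in tagset if tag in sentence]
--         if not active:
--             continue
--         tr = relations[count]
--         vals = [(tags, set(tr[tags][1::2]) if tags in tr else {'none'}) for tags in tagset]
--         for tag in active:
--             cnt = {}
--             for r in sentence[tag]:
--                 cnt[r] = cnt.get(r, 0) + 1
--             temp = arc[tag]
--             for tags, value in vals:
--                 m = sum(cnt.get(v, 0) for v in value)
--                 if m:
--                     temp[tags] = temp.get(tags, 0) + m
--     return arc
-- ===== Notes on version B (the rewrite author's own statement) =====
-- stated objective: alternative
-- what changed: B inverts A's loop nesting: instead of A's per-tag passes over a precomputed arc_dict table with one-by-one increments, B makes a single sentence-major pass over lr_list maintaining all tags' accumulator dicts at once, computes each sentence's relation values on the fly (no arc_dict), and counts matches by building a frequency Counter of the sentence's relation and summing its entries over the deduplicated value set.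
import Mathlib
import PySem

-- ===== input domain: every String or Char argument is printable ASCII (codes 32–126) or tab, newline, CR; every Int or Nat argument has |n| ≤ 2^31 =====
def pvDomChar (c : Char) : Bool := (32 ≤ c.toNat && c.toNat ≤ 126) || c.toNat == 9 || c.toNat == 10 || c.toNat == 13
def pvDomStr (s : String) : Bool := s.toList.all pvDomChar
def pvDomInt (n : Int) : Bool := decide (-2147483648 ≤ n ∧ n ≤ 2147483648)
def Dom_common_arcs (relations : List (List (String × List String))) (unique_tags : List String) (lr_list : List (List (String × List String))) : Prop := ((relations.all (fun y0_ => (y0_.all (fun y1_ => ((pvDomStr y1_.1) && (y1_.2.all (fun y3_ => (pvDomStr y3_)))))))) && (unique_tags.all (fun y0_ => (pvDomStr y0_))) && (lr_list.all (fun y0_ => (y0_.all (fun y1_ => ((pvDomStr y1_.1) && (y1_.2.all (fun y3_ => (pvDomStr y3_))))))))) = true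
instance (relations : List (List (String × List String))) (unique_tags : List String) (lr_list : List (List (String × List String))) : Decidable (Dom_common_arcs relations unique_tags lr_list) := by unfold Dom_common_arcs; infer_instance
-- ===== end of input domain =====

-- B replaces A's per-tag passes over a precomputed arc_dict table by ONE sentence-major pass
-- maintaining all tags' accumulators at once, with per-sentence values computed on the fly and
-- match counts taken from a Counter of the relation (objective: alternative; same return value).

-- ===== PORT A =====
def common_arcs (relations : List (List (String × List String))) (unique_tags : List String) (lr_list : List (List (String × List String))) : List (String × List (String × Int)) :=
  let arc_dict : PySem.Dict String (List (List String)) :=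
    unique_tags.foldl (fun ad tag =>
      ad.insert tag (relations.foldl (fun tag_left_right tags_relation =>
        if (PySem.Dict.mk tags_relation).contains tag then
          tag_left_right ++ [(PySem.List.slice? ((PySem.Dict.mk tags_relation).getD tag []) (some 1) none 2).getD []]
        else
          tag_left_right ++ [["none"]]) [])) PySem.Dict.empty
  let arc : PySem.Dict String (PySem.Dict String Int) :=
    unique_tags.foldl (fun arc tag =>
      arc.insert tag ((lr_list.foldl (fun (st : PySem.Dict String Int × Int) sentence =>
        (if (PySem.Dict.mk sentence).contains tag then
            let relation := (PySem.Dict.mk sentence).getD tag []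
            arc_dict.keys.foldl (fun temp_dict tags =>
              let head := arc_dict.getD tags []
              let value := PySem.List.pyGetD head st.2 []
              (PySem.List.pyRange 0 (PySem.List.len relation) 1).foldl (fun temp_dict rel =>
                -- Python's 'relation[rel] == value' compares a str with a list: always False there, so only the membership test remains
                if value.contains (PySem.List.pyGetD relation rel "") then
                  if temp_dict.contains tags then temp_dict.insert tags (temp_dict.getD tags 0 + 1)
                  else temp_dict.insert tags 1
                else temp_dict) temp_dict) st.1
          else st.1,
         st.2 + 1)) (PySem.Dict.empty, (0 : Int))).1)) PySem.Dict.empty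
  arc.items.map (fun p => (p.1, p.2.items))

-- ===== PORT B =====
def common_arcs_alt (relations : List (List (String × List String))) (unique_tags : List String) (lr_list : List (List (String × List String))) : List (String × List (String × Int)) :=
  let tagset := PySem.List.dedup unique_tags
  let arc0 : PySem.Dict String (PySem.Dict String Int) :=
    tagset.foldl (fun d tag => d.insert tag PySem.Dict.empty) PySem.Dict.empty
  let arc := (PySem.List.enumerate lr_list).foldl (fun arc p =>
    let sentence := p.2
    let active := tagset.filter (fun tag => (PySem.Dict.mk sentence).contains tag)
    if active.isEmpty then arc else
      let tr := PySem.List.pyGetD relations p.1 []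
      let vals := tagset.map (fun tags =>
        (tags, if (PySem.Dict.mk tr).contains tags then
                 PySem.Set.ofList ((PySem.List.slice? ((PySem.Dict.mk tr).getD tags []) (some 1) none 2).getD [])
               else PySem.Set.ofList ["none"]))
      active.foldl (fun arc tag =>
        let cnt : PySem.Dict String Int :=
          ((PySem.Dict.mk sentence).getD tag []).foldl (fun c r => c.insert r (c.getD r 0 + 1)) PySem.Dict.empty
        arc.insert tag (vals.foldl (fun temp pv =>
          let m : Int := pv.2.foldl (fun s v => s + cnt.getD v 0) 0
          if m ≠ 0 then temp.insert pv.1 (temp.getD pv.1 0 + m) else temp) (arc.getD tag PySem.Dict.empty))) arc) arc0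
  arc.items.map (fun q => (q.1, q.2.items))

-- ===== PRECONDITION & SPEC =====
-- Pre_ excludes exactly the inputs where A raises IndexError: a sentence beyond len(relations)
-- that contains one of the tags (there head[count] is out of range; B's relations[count] raises too).
def Pre_common_arcs (relations : List (List (String × List String))) (unique_tags : List String) (lr_list : List (List (String × List String))) : Prop :=
  ∀ sentence ∈ lr_list.drop relations.length, ∀ tag ∈ unique_tags,
    (PySem.Dict.mk sentence).contains tag = false
instance (relations : List (List (String × List String))) (unique_tags : List String) (lr_list : List (List (String × List String))) : Decidable (Pre_common_arcs relations unique_tags lr_list) := by unfold Pre_common_arcs; infer_instance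

def pvWitness_common_arcs : (List (List (String × List String))) × List String × (List (List (String × List String))) :=
  ([[("a", ["b", "a"])]], ["a"], [[("a", ["a"])]])

def Spec_common_arcs (relations : List (List (String × List String))) (unique_tags : List String) (lr_list : List (List (String × List String))) (out : List (String × List (String × Int))) : Prop := out = common_arcs_alt relations unique_tags lr_list
instance (relations : List (List (String × List String))) (unique_tags : List String) (lr_list : List (List (String × List String))) (out : List (String × List (String × Int))) : Decidable (Spec_common_arcs relations unique_tags lr_list out) := by unfold Spec_common_arcs; infer_instance

-- ===== CLAIM (what is proved, stated in full; the proofs are below) =====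
def Claim_equal_common_arcs : Prop := ∀ (relations : List (List (String × List String))) (unique_tags : List String) (lr_list : List (List (String × List String))), Dom_common_arcs relations unique_tags lr_list → Pre_common_arcs relations unique_tags lr_list → Spec_common_arcs relations unique_tags lr_list (common_arcs relations unique_tags lr_list)

-- ===== LEMMAS AND PROOFS =====

-- the canonical per-tag value both proofs converge to: sentence fold with aggregated countP increments
def pvV (relations : List (List (String × List String))) (n : Int) (tags : String) : List String :=
  if (PySem.Dict.mk (PySem.List.pyGetD relations n [])).contains tags then
    (PySem.List.slice? ((PySem.Dict.mk (PySem.List.pyGetD relations n [])).getD tags []) (some 1) none 2).getD []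
  else ["none"]

def pvM (relations : List (List (String × List String))) (p : Int × List (String × List String)) (tag tags : String) : Int :=
  ((((PySem.Dict.mk p.2).getD tag []).countP (fun r => (pvV relations p.1 tags).contains r) : Int))

def pvG (relations : List (List (String × List String))) (unique_tags : List String) (lr_list : List (List (String × List String))) (tag : String) : PySem.Dict String Int :=
  (PySem.List.enumerate lr_list).foldl (fun temp p =>
    if (PySem.Dict.mk p.2).contains tag then
      (PySem.List.dedup unique_tags).foldl (fun temp tags =>
        if pvM relations p tag tags ≠ 0 then temp.insert tags (temp.getD tags 0 + pvM relations p tag tags)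
        else temp) temp
    else temp) PySem.Dict.empty

-- a dict tabulating a function over a key list
def pvTab {X : Type} (K : List String) (g : String → X) : PySem.Dict String X :=
  K.foldl (fun d t => d.insert t (g t)) PySem.Dict.empty

-- lookup in a fold of inserts whose value depends only on the key
lemma pv_getD_foldl_insert {X : Type} (v : String → X) (dflt : X) :
    ∀ (l : List String) (d : PySem.Dict String X) (k : String),
      (l.foldl (fun d t => d.insert t (v t)) d).getD k dflt
        = if k ∈ l then v k else d.getD k dflt := by
  intro l
  induction l with
  | nil => simp
  | cons t l ih =>
    intro d k
    simp only [List.foldl_cons, ih, List.mem_cons]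
    by_cases hl : k ∈ l
    · simp [hl]
    · by_cases hk : k = t
      · subst hk; simp [hl, PySem.Dict.getD_insert_self]
      · simp [hl, hk, PySem.Dict.getD_insert_of_ne _ _ _ hk]

lemma pv_tab_items {X : Type} (K : List String) (hK : K.Nodup) (g : String → X) :
    (pvTab K g).items = K.map (fun t => (t, g t)) := by
  unfold pvTab
  have h := PySem.Dict.items_foldl_insert_fresh K (fun t => t) g PySem.Dict.empty
    (by intro a _; exact PySem.Dict.contains_empty a) (by simpa using hK)
  simpa using h

lemma pv_tab_keys {X : Type} (K : List String) (hK : K.Nodup) (g : String → X) :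
    (pvTab K g).keys = K := by
  simp only [PySem.Dict.keys, pv_tab_items K hK g, List.map_map]
  simp [Function.comp_def]

lemma pv_tab_congr {X : Type} (K : List String) (g g' : String → X)
    (h : ∀ t ∈ K, g t = g' t) : pvTab K g = pvTab K g' := by
  unfold pvTab
  exact PySem.List.foldl_congr_mem K _ _ _ (by intro acc t ht; rw [h t ht])

lemma pv_tab_insert {X : Type} (K : List String) (hK : K.Nodup) (g : String → X)
    (l : String) (hl : l ∈ K) (v : X) :
    (pvTab K g).insert l v = pvTab K (fun t => if t = l then v else g t) := by
  apply PySem.Dict.ext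
  have hc : (pvTab K g).contains l = true := by
    rw [PySem.Dict.contains_iff_mem_keys, pv_tab_keys K hK g]; exact hl
  rw [PySem.Dict.items_insert_of_contains _ v hc, pv_tab_items K hK, pv_tab_items K hK,
    List.map_map]
  apply List.map_congr_left
  intro t _
  by_cases ht : t = l
  · subst ht; simp
  · simp [ht]

-- one sentence: applying the updates of a nodup list of keys inside K updates the table pointwise
lemma pv_one_pass (K : List String) (hK : K.Nodup)
    (u : String → PySem.Dict String Int → PySem.Dict String Int) :
    ∀ (L : List String), L.Nodup → (∀ t ∈ L, t ∈ K) →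
    ∀ (g : String → PySem.Dict String Int),
      L.foldl (fun arc t => arc.insert t (u t (arc.getD t PySem.Dict.empty))) (pvTab K g)
        = pvTab K (fun t => if t ∈ L then u t (g t) else g t) := by
  intro L
  induction L with
  | nil => intro _ _ g; simp
  | cons l L ih =>
    intro hnd hsub g
    simp only [List.foldl_cons]
    have hlK : l ∈ K := hsub l (by simp)
    have hget : (pvTab K g).getD l PySem.Dict.empty = g l := by
      unfold pvTab; rw [pv_getD_foldl_insert, if_pos hlK]
    rw [hget, pv_tab_insert K hK g l hlK]
    rw [ih (List.Nodup.of_cons hnd) (by intro t ht; exact hsub t (List.mem_cons_of_mem _ ht)) _]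
    apply pv_tab_congr
    intro t _
    have hlL : l ∉ L := (List.nodup_cons.mp hnd).1
    by_cases htL : t ∈ L
    · have htl : t ≠ l := by intro h; exact hlL (h ▸ htL)
      simp [htL, htl]
    · by_cases htl : t = l
      · subst htl; simp [htL]
      · simp [htL, htl]

-- LOOP INTERCHANGE: the sentence-major fold over a tabulated dict equals the per-tag folds
lemma pv_interchange {P : Type} (K : List String) (hK : K.Nodup)
    (pred : String → P → Bool) (upd : String → P → PySem.Dict String Int → PySem.Dict String Int) :
    ∀ (pairs : List P) (g : String → PySem.Dict String Int),
      pairs.foldl (fun arc p =>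
          (K.filter (fun t => pred t p)).foldl
            (fun arc t => arc.insert t (upd t p (arc.getD t PySem.Dict.empty))) arc) (pvTab K g)
        = pvTab K (fun t => pairs.foldl (fun temp p => if pred t p then upd t p temp else temp) (g t)) := by
  intro pairs
  induction pairs with
  | nil => intro g; rfl
  | cons p pairs ih =>
    intro g
    simp only [List.foldl_cons]
    rw [pv_one_pass K hK (fun t => upd t p) (K.filter (fun t => pred t p))
      (List.Nodup.filter _ hK) (by intro t ht; exact (List.mem_filter.mp ht).1) g]
    rw [pv_tab_congr K _ (fun t => if pred t p then upd t p (g t) else g t)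
      (by intro t ht; simp [List.mem_filter, ht])]
    rw [ih]

-- folding inserts of a key-determined value over the full list tabulates over the dedup
lemma pv_foldl_insert_eq_tab {X : Type} (g : String → X) :
    ∀ (l : List String) (K : List String), K.Nodup →
      l.foldl (fun d t => d.insert t (g t)) (pvTab K g) = pvTab (PySem.Set.update K l) g := by
  intro l
  induction l with
  | nil => intro K _; rfl
  | cons t l ih =>
    intro K hK
    simp only [List.foldl_cons]
    have hupd : PySem.Set.update K (t :: l) = PySem.Set.update (PySem.Set.add K t) l := rfl
    rw [hupd]
    by_cases ht : t ∈ K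
    · have hcontains : K.contains t = true := by simpa using ht
      have hadd : PySem.Set.add K t = K := by simp [PySem.Set.add, ht]
      rw [pv_tab_insert K hK g t ht (g t),
        pv_tab_congr K _ g (by intro s _; by_cases h : s = t <;> simp [h]), hadd]
      exact ih K hK
    · have hcontains : K.contains t = false := by simpa using ht
      have hadd : PySem.Set.add K t = K ++ [t] := by simp [PySem.Set.add, ht]
      have happ : (pvTab K g).insert t (g t) = pvTab (K ++ [t]) g := by
        unfold pvTab; rw [List.foldl_append]; rfl
      rw [happ, hadd]
      exact ih (K ++ [t]) (by
        rw [List.nodup_append]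
        exact ⟨hK, List.nodup_singleton t, by
          intro a ha b hb
          simp only [List.mem_singleton] at hb
          subst hb
          exact fun h => ht (h ▸ ha)⟩)

-- A's tag_left_right loop builds exactly the per-sentence value list
lemma pv_tlr_eq_map (relations : List (List (String × List String))) (tag : String) :
    relations.foldl (fun tag_left_right tags_relation =>
        if (PySem.Dict.mk tags_relation).contains tag then
          tag_left_right ++ [(PySem.List.slice? ((PySem.Dict.mk tags_relation).getD tag []) (some 1) none 2).getD []]
        else
          tag_left_right ++ [["none"]]) []
      = relations.map (fun tr =>
          if (PySem.Dict.mk tr).contains tag then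
            (PySem.List.slice? ((PySem.Dict.mk tr).getD tag []) (some 1) none 2).getD []
          else ["none"]) := by
  have h1 := PySem.List.foldl_congr_mem relations
    (fun tag_left_right tags_relation =>
      if (PySem.Dict.mk tags_relation).contains tag then
        tag_left_right ++ [(PySem.List.slice? ((PySem.Dict.mk tags_relation).getD tag []) (some 1) none 2).getD []]
      else
        tag_left_right ++ [["none"]])
    (fun acc tr => acc ++ [if (PySem.Dict.mk tr).contains tag then
        (PySem.List.slice? ((PySem.Dict.mk tr).getD tag []) (some 1) none 2).getD []
      else ["none"]])
    [] (by intro acc tr _; by_cases h : (PySem.Dict.mk tr).contains tag = true <;> simp [h])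
  rw [h1, PySem.List.foldl_append_singleton_eq_map]
  simp

-- A's per-element increment loop over relation is one aggregated count-and-add
lemma pv_count_fold (tags : String) (value : List String) :
    ∀ (l : List String) (t : PySem.Dict String Int),
      l.foldl (fun temp_dict r =>
          if value.contains r then
            if temp_dict.contains tags then temp_dict.insert tags (temp_dict.getD tags 0 + 1)
            else temp_dict.insert tags 1
          else temp_dict) t
        = if ((l.countP (fun r => value.contains r) : Int)) ≠ 0 then
            t.insert tags (t.getD tags 0 + ((l.countP (fun r => value.contains r) : Int)))
          else t := by
  intro l
  induction l with
  | nil => intro t; simp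
  | cons r l ih =>
    intro t
    simp only [List.foldl_cons]
    by_cases hv : value.contains r = true
    · rw [if_pos hv]
      have hinc : (if t.contains tags = true then t.insert tags (t.getD tags 0 + 1) else t.insert tags 1)
          = t.insert tags (t.getD tags 0 + 1) := by
        by_cases h : t.contains tags
        · simp [h]
        · have hf : t.contains tags = false := by simpa using h
          rw [if_neg (by simp [hf]), PySem.Dict.getD_of_not_contains _ _ hf]
          norm_num
      have hcnt : (r :: l).countP (fun r => value.contains r)
          = l.countP (fun r => value.contains r) + 1 := by
        rw [List.countP_cons, if_pos hv]
      rw [hinc, ih, hcnt]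
      generalize List.countP (fun r => value.contains r) l = cl
      by_cases h0 : cl = 0
      · subst h0
        norm_num
      · rw [if_pos (show ((cl : Int)) ≠ 0 by exact_mod_cast h0),
            if_pos (show (((cl + 1 : Nat)) : Int) ≠ 0 by push_cast; omega),
            PySem.Dict.getD_insert_self, PySem.Dict.insert_insert_self]
        have harith : t.getD tags 0 + 1 + (cl : Int) = t.getD tags 0 + ((cl + 1 : Nat) : Int) := by
          push_cast; ring
        rw [harith]
    · rw [if_neg hv, ih]
      have hcnt : (r :: l).countP (fun r => value.contains r)
          = l.countP (fun r => value.contains r) := by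
        rw [List.countP_cons, if_neg hv, Nat.add_zero]
      rw [hcnt]

-- per-sentence inner loop: A's scan of arc_dict equals the aggregated canonical fold
lemma pv_body (relations : List (List (String × List String))) (unique_tags : List String)
    (arc_dict : PySem.Dict String (List (List String)))
    (harcV : ∀ tags ∈ PySem.List.dedup unique_tags, arc_dict.getD tags []
        = relations.map (fun tr =>
            if (PySem.Dict.mk tr).contains tags then
              (PySem.List.slice? ((PySem.Dict.mk tr).getD tags []) (some 1) none 2).getD []
            else ["none"]))
    (harcK : arc_dict.keys = PySem.List.dedup unique_tags)
    (relation : List String) (n : Nat) (hn : n < relations.length) (temp : PySem.Dict String Int) :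
    arc_dict.keys.foldl (fun temp_dict tags =>
        (PySem.List.pyRange 0 (PySem.List.len relation) 1).foldl (fun temp_dict rel =>
          if (PySem.List.pyGetD (arc_dict.getD tags []) (n : Int) []).contains
               (PySem.List.pyGetD relation rel "") then
            if temp_dict.contains tags then temp_dict.insert tags (temp_dict.getD tags 0 + 1)
            else temp_dict.insert tags 1
          else temp_dict) temp_dict) temp
      = (PySem.List.dedup unique_tags).foldl (fun temp tags =>
          if ((relation.countP (fun r =>
                (if (PySem.Dict.mk (PySem.List.pyGetD relations (n : Int) [])).contains tags then
                  (PySem.List.slice? ((PySem.Dict.mk (PySem.List.pyGetD relations (n : Int) [])).getD tags []) (some 1) none 2).getD []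
                else ["none"]).contains r) : Int)) ≠ 0 then
            temp.insert tags (temp.getD tags 0 +
              ((relation.countP (fun r =>
                (if (PySem.Dict.mk (PySem.List.pyGetD relations (n : Int) [])).contains tags then
                  (PySem.List.slice? ((PySem.Dict.mk (PySem.List.pyGetD relations (n : Int) [])).getD tags []) (some 1) none 2).getD []
                else ["none"]).contains r) : Int)))
          else temp) temp := by
  rw [harcK]
  apply PySem.List.foldl_congr_mem
  intro acc tags htags
  have hsent : PySem.List.pyGetD relations (n : Int) [] = relations[n] := by
    simp [PySem.List.pyGetD_natCast, List.getD_eq_getElem?_getD, List.getElem?_eq_getElem hn]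
  have hval : PySem.List.pyGetD (arc_dict.getD tags []) (n : Int) []
      = (if (PySem.Dict.mk (PySem.List.pyGetD relations (n : Int) [])).contains tags then
          (PySem.List.slice? ((PySem.Dict.mk (PySem.List.pyGetD relations (n : Int) [])).getD tags []) (some 1) none 2).getD []
        else ["none"]) := by
    rw [harcV tags htags, hsent]
    simp [PySem.List.pyGetD_natCast, List.getD_eq_getElem?_getD, List.getElem?_map,
      List.getElem?_eq_getElem hn]
  rw [hval]
  rw [PySem.List.foldl_pyRange_pyGetD relation ""
    (f := fun temp_dict r =>
      if ((if (PySem.Dict.mk (PySem.List.pyGetD relations (n : Int) [])).contains tags then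
            (PySem.List.slice? ((PySem.Dict.mk (PySem.List.pyGetD relations (n : Int) [])).getD tags []) (some 1) none 2).getD []
          else ["none"]).contains r) then
        if temp_dict.contains tags then temp_dict.insert tags (temp_dict.getD tags 0 + 1)
        else temp_dict.insert tags 1
      else temp_dict) acc (le_refl 0)]
  simp only [Int.toNat_zero, List.drop_zero]
  rw [pv_count_fold]

-- the sentence loop with its running counter equals the canonical enumerate loop
lemma pv_sentLoop (relations : List (List (String × List String))) (unique_tags : List String)
    (arc_dict : PySem.Dict String (List (List String)))
    (harcV : ∀ tags ∈ PySem.List.dedup unique_tags, arc_dict.getD tags []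
        = relations.map (fun tr =>
            if (PySem.Dict.mk tr).contains tags then
              (PySem.List.slice? ((PySem.Dict.mk tr).getD tags []) (some 1) none 2).getD []
            else ["none"]))
    (harcK : arc_dict.keys = PySem.List.dedup unique_tags) (tag : String) :
    ∀ (ls : List (List (String × List String))) (n : Nat) (temp : PySem.Dict String Int),
      (∀ (k : Nat) (hk : k < ls.length), (PySem.Dict.mk ls[k]).contains tag = true → n + k < relations.length) →
      (ls.foldl (fun (st : PySem.Dict String Int × Int) sentence =>
          (if (PySem.Dict.mk sentence).contains tag then
              arc_dict.keys.foldl (fun temp_dict tags =>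
                (PySem.List.pyRange 0 (PySem.List.len ((PySem.Dict.mk sentence).getD tag [])) 1).foldl
                  (fun temp_dict rel =>
                    if (PySem.List.pyGetD (arc_dict.getD tags []) st.2 []).contains
                         (PySem.List.pyGetD ((PySem.Dict.mk sentence).getD tag []) rel "") then
                      if temp_dict.contains tags then temp_dict.insert tags (temp_dict.getD tags 0 + 1)
                      else temp_dict.insert tags 1
                    else temp_dict) temp_dict) st.1
            else st.1,
           st.2 + 1)) (temp, (n : Int))).1
        = (PySem.List.enumerate ls (n : Int)).foldl (fun temp p =>
            if (PySem.Dict.mk p.2).contains tag then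
              (PySem.List.dedup unique_tags).foldl (fun temp tags =>
                if ((((PySem.Dict.mk p.2).getD tag []).countP (fun r =>
                      (if (PySem.Dict.mk (PySem.List.pyGetD relations p.1 [])).contains tags then
                        (PySem.List.slice? ((PySem.Dict.mk (PySem.List.pyGetD relations p.1 [])).getD tags []) (some 1) none 2).getD []
                      else ["none"]).contains r) : Int)) ≠ 0 then
                  temp.insert tags (temp.getD tags 0 +
                    ((((PySem.Dict.mk p.2).getD tag []).countP (fun r =>
                      (if (PySem.Dict.mk (PySem.List.pyGetD relations p.1 [])).contains tags then
                        (PySem.List.slice? ((PySem.Dict.mk (PySem.List.pyGetD relations p.1 [])).getD tags []) (some 1) none 2).getD []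
                      else ["none"]).contains r) : Int)))
                else temp) temp
            else temp) temp := by
  intro ls
  induction ls with
  | nil => intro n temp _; simp [PySem.List.enumerate_nil]
  | cons s ls ih =>
    intro n temp H
    rw [PySem.List.enumerate_cons]
    simp only [List.foldl_cons]
    have hcast : (n : Int) + 1 = ((n + 1 : Nat) : Int) := by push_cast; ring
    rw [hcast]
    rw [ih (n + 1) _ (by
      intro k hk hc
      have := H (k + 1) (by simpa using Nat.succ_lt_succ hk) (by simpa using hc)
      omega)]
    congr 1
    by_cases hc : (PySem.Dict.mk s).contains tag = true
    · rw [if_pos hc, if_pos hc]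
      have hn : n < relations.length := by
        have := H 0 (by simp) hc
        omega
      exact pv_body relations unique_tags arc_dict harcV harcK _ n hn temp
    · rw [if_neg hc, if_neg hc]

-- summing the relation's multiplicities over the distinct values is the membership count
lemma pv_sum_counts (value : List String) :
    ∀ (rel : List String),
      ((PySem.List.dedup value).map (fun v => (rel.count v : Int))).sum
        = (rel.countP (fun r => value.contains r) : Int) := by
  intro rel
  induction rel with
  | nil => simp
  | cons a rel ih =>
    have hstep : ∀ v : String, ((a :: rel).count v : Int)
        = (rel.count v : Int) + (if v == a then (1 : Int) else 0) := by
      intro v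
      rw [List.count_cons]
      by_cases h : v = a
      · subst h; simp
      · simp [Ne.symm h]
        exact h
    rw [List.map_congr_left (fun v _ => hstep v), PySem.List.sum_map_add_int, ih,
      PySem.List.sum_map_ite_one_zero]
    have hcount : (PySem.List.dedup value).countP (fun v => v == a)
        = if value.contains a then 1 else 0 := by
      rw [show (fun v : String => v == a) = (· == a) from rfl, ← List.count]
      by_cases h : a ∈ value
      · rw [List.count_eq_one_of_mem (PySem.List.nodup_dedup value)
          ((PySem.List.mem_dedup value a).mpr h), if_pos (by simpa using h)]
      · rw [List.count_eq_zero_of_not_mem (by simpa [PySem.List.mem_dedup] using h),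
          if_neg (by simpa using h)]
    rw [List.countP_cons, hcount]
    simp

-- B's Counter-sum over the distinct values equals the countP of the canonical form
lemma pv_m_eq (value relation : List String) :
    (PySem.Set.ofList value).foldl (fun s v =>
        s + (relation.foldl (fun c r => c.insert r (c.getD r 0 + 1)) PySem.Dict.empty).getD v 0) 0
      = (relation.countP (fun r => value.contains r) : Int) := by
  rw [PySem.List.foldl_add (g := fun v =>
    (relation.foldl (fun c r => c.insert r (c.getD r 0 + 1)) PySem.Dict.empty).getD v 0)]
  rw [List.map_congr_left (fun v _ => by
    rw [PySem.Dict.foldl_insert_getD_add_one_eq_counter, PySem.Dict.getD_counter])]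
  rw [show (PySem.Set.ofList value : List String) = PySem.List.dedup value by simp]
  rw [pv_sum_counts value relation]
  ring

-- B's inner fold over the per-sentence vals list equals the canonical inner fold
lemma pv_upd_eq (relations : List (List (String × List String))) (unique_tags : List String)
    (p : Int × List (String × List String)) (tag : String) (temp : PySem.Dict String Int) :
    ((PySem.List.dedup unique_tags).map (fun tags =>
        (tags, if (PySem.Dict.mk (PySem.List.pyGetD relations p.1 [])).contains tags then
                 PySem.Set.ofList ((PySem.List.slice? ((PySem.Dict.mk (PySem.List.pyGetD relations p.1 [])).getD tags []) (some 1) none 2).getD [])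
               else PySem.Set.ofList ["none"]))).foldl (fun temp pv =>
        let m : Int := pv.2.foldl (fun s v =>
          s + (((PySem.Dict.mk p.2).getD tag []).foldl (fun c r => c.insert r (c.getD r 0 + 1)) PySem.Dict.empty).getD v 0) 0
        if m ≠ 0 then temp.insert pv.1 (temp.getD pv.1 0 + m) else temp) temp
      = (PySem.List.dedup unique_tags).foldl (fun temp tags =>
          if pvM relations p tag tags ≠ 0 then
            temp.insert tags (temp.getD tags 0 + pvM relations p tag tags)
          else temp) temp := by
  rw [List.foldl_map]
  apply PySem.List.foldl_congr_mem
  intro acc tags _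
  have hset : (if (PySem.Dict.mk (PySem.List.pyGetD relations p.1 [])).contains tags then
        PySem.Set.ofList ((PySem.List.slice? ((PySem.Dict.mk (PySem.List.pyGetD relations p.1 [])).getD tags []) (some 1) none 2).getD [])
      else PySem.Set.ofList ["none"]) = PySem.Set.ofList (pvV relations p.1 tags) := by
    unfold pvV
    by_cases h : (PySem.Dict.mk (PySem.List.pyGetD relations p.1 [])).contains tags = true <;> simp [h]
  simp only [hset]
  rw [show (fun (s : Int) v =>
      s + (((PySem.Dict.mk p.2).getD tag []).foldl (fun c r => c.insert r (c.getD r 0 + 1)) PySem.Dict.empty).getD v 0)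
    = (fun (s : Int) v =>
      s + (((PySem.Dict.mk p.2).getD tag []).foldl (fun c r => c.insert r (c.getD r 0 + 1)) PySem.Dict.empty).getD v 0) from rfl]
  rw [pv_m_eq (pvV relations p.1 tags) ((PySem.Dict.mk p.2).getD tag [])]
  rfl

-- ===== VERDICT (by name: the statement is the Claim_ definition above) =====
theorem common_arcs_spec : Claim_equal_common_arcs := by
  intro relations unique_tags lr_list _hdom hpre
  unfold Spec_common_arcs
  have hKnd : (PySem.List.dedup unique_tags).Nodup := PySem.List.nodup_dedup unique_tags
  -- ===== A equals the canonical tabulation =====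
  have hA : common_arcs relations unique_tags lr_list
      = (pvTab (PySem.List.dedup unique_tags) (pvG relations unique_tags lr_list)).items.map
          (fun p => (p.1, p.2.items)) := by
    unfold common_arcs
    have hfold : unique_tags.foldl
        (fun d t => d.insert t (pvG relations unique_tags lr_list t)) (pvTab [] (pvG relations unique_tags lr_list))
        = pvTab (PySem.Set.update [] unique_tags) (pvG relations unique_tags lr_list) :=
      pv_foldl_insert_eq_tab _ unique_tags [] List.nodup_nil
    rw [PySem.Set.update_nil_left] at hfold
    rw [show PySem.Set.ofList unique_tags = PySem.List.dedup unique_tags by simp] at hfold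
    rw [← hfold]
    apply congrArg
    apply congrArg
    apply PySem.List.foldl_congr_mem
    intro acc tag htag
    apply congrArg
    have harcK : (unique_tags.foldl (fun ad tag =>
        ad.insert tag (relations.foldl (fun tag_left_right tags_relation =>
          if (PySem.Dict.mk tags_relation).contains tag then
            tag_left_right ++ [(PySem.List.slice? ((PySem.Dict.mk tags_relation).getD tag []) (some 1) none 2).getD []]
          else
            tag_left_right ++ [["none"]]) [])) PySem.Dict.empty).keys = PySem.List.dedup unique_tags := by
      rw [PySem.Dict.keys_foldl_insert]
      rw [PySem.List.dedup_eq_ofList]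
      simp [PySem.Set.update_nil_left, PySem.Dict.keys_empty]
    have harcV : ∀ tags ∈ PySem.List.dedup unique_tags,
        (unique_tags.foldl (fun ad tag =>
          ad.insert tag (relations.foldl (fun tag_left_right tags_relation =>
            if (PySem.Dict.mk tags_relation).contains tag then
              tag_left_right ++ [(PySem.List.slice? ((PySem.Dict.mk tags_relation).getD tag []) (some 1) none 2).getD []]
            else
              tag_left_right ++ [["none"]]) [])) PySem.Dict.empty).getD tags []
        = relations.map (fun tr =>
            if (PySem.Dict.mk tr).contains tags then
              (PySem.List.slice? ((PySem.Dict.mk tr).getD tags []) (some 1) none 2).getD []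
            else ["none"]) := by
      intro tags htags
      have hmem : tags ∈ unique_tags := by
        have := PySem.List.mem_dedup (xs := unique_tags) (x := tags)
        exact this.mp htags
      rw [pv_getD_foldl_insert]
      rw [if_pos hmem, pv_tlr_eq_map]
    have H0 : ∀ (k : Nat) (hk : k < lr_list.length),
        (PySem.Dict.mk lr_list[k]).contains tag = true → 0 + k < relations.length := by
      intro k hk hc
      by_contra hge
      have hgek : relations.length ≤ k := by omega
      have hmemdrop : lr_list[k] ∈ lr_list.drop relations.length := by
        have : (lr_list.drop relations.length)[k - relations.length]'(by
          simp [List.length_drop]; omega) = lr_list[k] := by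
          rw [List.getElem_drop]
          congr 1
          omega
        rw [← this]
        exact List.getElem_mem _
      have := hpre _ hmemdrop tag htag
      rw [hc] at this
      exact absurd this (by simp)
    have := pv_sentLoop relations unique_tags _ harcV harcK tag lr_list 0 PySem.Dict.empty H0
    simp only [pvG, pvM, pvV]
    simpa using this
  -- ===== B equals the canonical tabulation =====
  have hB : common_arcs_alt relations unique_tags lr_list
      = (pvTab (PySem.List.dedup unique_tags) (pvG relations unique_tags lr_list)).items.map
          (fun q => (q.1, q.2.items)) := by
    unfold common_arcs_alt
    apply congrArg
    apply congrArg
    have hinit : (PySem.List.dedup unique_tags).foldl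
        (fun (d : PySem.Dict String (PySem.Dict String Int)) tag => d.insert tag PySem.Dict.empty) PySem.Dict.empty
        = pvTab (PySem.List.dedup unique_tags) (fun _ => PySem.Dict.empty) := rfl
    rw [hinit]
    have hstep : ∀ (arc : PySem.Dict String (PySem.Dict String Int))
        (p : Int × List (String × List String)), p ∈ PySem.List.enumerate lr_list →
        (let sentence := p.2
         let active := (PySem.List.dedup unique_tags).filter (fun tag => (PySem.Dict.mk sentence).contains tag)
         if active.isEmpty then arc else
           let tr := PySem.List.pyGetD relations p.1 []
           let vals := (PySem.List.dedup unique_tags).map (fun tags =>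
             (tags, if (PySem.Dict.mk tr).contains tags then
                      PySem.Set.ofList ((PySem.List.slice? ((PySem.Dict.mk tr).getD tags []) (some 1) none 2).getD [])
                    else PySem.Set.ofList ["none"]))
           active.foldl (fun arc tag =>
             let cnt : PySem.Dict String Int :=
               ((PySem.Dict.mk sentence).getD tag []).foldl (fun c r => c.insert r (c.getD r 0 + 1)) PySem.Dict.empty
             arc.insert tag (vals.foldl (fun temp pv =>
               let m : Int := pv.2.foldl (fun s v => s + cnt.getD v 0) 0
               if m ≠ 0 then temp.insert pv.1 (temp.getD pv.1 0 + m) else temp) (arc.getD tag PySem.Dict.empty))) arc)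
        = ((PySem.List.dedup unique_tags).filter (fun t => (PySem.Dict.mk p.2).contains t)).foldl
            (fun arc t => arc.insert t
              ((PySem.List.dedup unique_tags).foldl (fun temp tags =>
                if pvM relations p t tags ≠ 0 then
                  temp.insert tags (temp.getD tags 0 + pvM relations p t tags)
                else temp) (arc.getD t PySem.Dict.empty))) arc := by
      intro arc p _
      by_cases hemp : ((PySem.List.dedup unique_tags).filter (fun tag => (PySem.Dict.mk p.2).contains tag)).isEmpty = true
      · have hnil : (PySem.List.dedup unique_tags).filter (fun tag => (PySem.Dict.mk p.2).contains tag) = [] :=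
          List.isEmpty_iff.mp hemp
        simp only [hnil, List.foldl_nil]
        simp
      · simp only [hemp, if_neg, Bool.false_eq_true, not_false_iff]
        apply PySem.List.foldl_congr_mem
        intro acc tag _
        apply congrArg
        exact pv_upd_eq relations unique_tags p tag (acc.getD tag PySem.Dict.empty)
    rw [PySem.List.foldl_congr_mem _ _ _ _ hstep]
    rw [pv_interchange (PySem.List.dedup unique_tags) hKnd
      (fun t p => (PySem.Dict.mk p.2).contains t)
      (fun t p temp => (PySem.List.dedup unique_tags).foldl (fun temp tags =>
        if pvM relations p t tags ≠ 0 then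
          temp.insert tags (temp.getD tags 0 + pvM relations p t tags)
        else temp) temp)
      (PySem.List.enumerate lr_list) (fun _ => PySem.Dict.empty)]
    apply pv_tab_congr
    intro t _
    rfl
  rw [hA, hB]
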